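-- pv_equiv track=rewrite | github.com/paperClub-hub/paperClub_daily | 20221027_文本分割成完整句子/docment_cutter.py | cutoff
-- ===== SOURCE A (Python) =====
-- def cutoff(paras, max_len: int=1024):
-- 	""" 句子截断 """
-- 	num = 0
-- 	bag, bag2 = [], []
-- 	total_len, half_len = len("".join(paras)), int(max_len / 2)
-- 	if total_len > max_len:
-- 		for i, txt in enumerate(paras):
-- 			num += len(txt)
-- 			if num <= half_len:
-- 				bag.append(txt)
--
-- 			elif num > total_len - half_len:
-- 				if txt not in bag:
-- 					bag2.append(txt)
--
-- 		if len("".join(bag + bag2)) > max_len: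
-- 			bag2 = bag2[1:]
--
-- 		return "".join(bag + bag2)
--
-- 	else:
-- 		return "".join(paras)
-- ===== SOURCE B (Python) =====
-- from bisect import bisect_right
-- from itertools import accumulate
--
-- def cutoff(paras, max_len: int = 1024):
--     """ 句子截断 """
--     pref = list(accumulate(len(p) for p in paras))
--     total_len = pref[-1] if pref else 0
--     if total_len <= max_len:
--         return "".join(paras)
--     half_len = int(max_len / 2)
--     h = bisect_right(pref, half_len)
--     t = max(h, bisect_right(pref, total_len - half_len))
--     bag = paras[:h]
--     head = set(bag)
--     bag2 = [p for p in paras[t:] if p not in head]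
--     joined = "".join(bag + bag2)
--     if len(joined) > max_len:
--         joined = "".join(bag + bag2[1:])
--     return joined
-- ===== Notes on version B (the rewrite author's own statement) =====
-- stated objective: alternative
-- what changed: Replaces A's single enumerate-loop (with a linear list-membership scan inside it) by a prefix-sum table plus two bisect_right binary searches locating the head/tail boundary indices, then slicing and a set-based membership filter.
import Mathlib
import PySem

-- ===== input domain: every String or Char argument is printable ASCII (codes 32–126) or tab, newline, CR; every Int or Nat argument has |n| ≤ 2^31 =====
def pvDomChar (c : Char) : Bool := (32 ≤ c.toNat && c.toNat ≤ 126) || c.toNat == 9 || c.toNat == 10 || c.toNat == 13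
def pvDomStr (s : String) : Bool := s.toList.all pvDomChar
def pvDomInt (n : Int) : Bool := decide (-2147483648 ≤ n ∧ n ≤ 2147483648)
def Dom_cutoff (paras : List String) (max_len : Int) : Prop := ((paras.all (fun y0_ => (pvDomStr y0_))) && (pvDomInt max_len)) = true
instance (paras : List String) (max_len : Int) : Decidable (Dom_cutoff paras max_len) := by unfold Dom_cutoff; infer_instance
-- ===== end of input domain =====

-- B replaces A's single accumulating loop (whose in-loop list-membership test rescans bag) by a
-- prefix-sum table plus two bisect_right binary searches locating the head/tail boundary indices,
-- then slicing and a set-based membership filter (objective: alternative).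

-- ===== PORT A =====
def cutoff (paras : List String) (max_len : Int) : String :=
  let total_len : Int := PySem.Str.len (PySem.Str.join "" paras)
  let half_len : Int := PySem.Int.truncdiv max_len 2
  if total_len > max_len then
    let st :=
      (PySem.List.enumerate paras).foldl
        (fun (s : Int × List String × List String) it =>
          if s.1 + PySem.Str.len it.2 ≤ half_len then
            (s.1 + PySem.Str.len it.2, s.2.1 ++ [it.2], s.2.2)
          else if s.1 + PySem.Str.len it.2 > total_len - half_len then
            if it.2 ∉ s.2.1 then (s.1 + PySem.Str.len it.2, s.2.1, s.2.2 ++ [it.2])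
            else (s.1 + PySem.Str.len it.2, s.2.1, s.2.2)
          else (s.1 + PySem.Str.len it.2, s.2.1, s.2.2))
        (0, [], [])
    let bag := st.2.1
    let bag2 :=
      if PySem.Str.len (PySem.Str.join "" (bag ++ st.2.2)) > max_len then
        PySem.List.slice st.2.2 (some 1) none
      else st.2.2
    PySem.Str.join "" (bag ++ bag2)
  else
    PySem.Str.join "" paras

-- ===== PORT B =====
-- itertools.accumulate over the paragraph lengths (running prefix sums)
def pyAccumulate (acc : Int) : List Int → List Int
  | [] => []
  | l :: rest => (acc + l) :: pyAccumulate (acc + l) rest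

def cutoff_alt (paras : List String) (max_len : Int) : String :=
  let pref := pyAccumulate 0 (paras.map PySem.Str.len)
  let total_len : Int := pref.getLastD 0
  if total_len ≤ max_len then
    PySem.Str.join "" paras
  else
    let half_len : Int := PySem.Int.truncdiv max_len 2
    let h := PySem.List.bisectRight pref half_len
    let t := max h (PySem.List.bisectRight pref (total_len - half_len))
    let bag := paras.take h
    let head := PySem.Set.ofList bag
    let bag2 := (paras.drop t).filter (fun p => !(PySem.Set.contains head p))
    let joined := PySem.Str.join "" (bag ++ bag2)
    if PySem.Str.len joined > max_len then
      PySem.Str.join "" (bag ++ PySem.List.slice bag2 (some 1) none)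
    else joined

-- ===== PRECONDITION & SPEC =====
def Spec_cutoff (paras : List String) (max_len : Int) (out : String) : Prop := out = cutoff_alt paras max_len
instance (paras : List String) (max_len : Int) (out : String) : Decidable (Spec_cutoff paras max_len out) := by unfold Spec_cutoff; infer_instance

-- ===== CLAIM (what is proved, stated in full; the proofs are below) =====
def Claim_equal_cutoff : Prop := ∀ (paras : List String) (max_len : Int), Dom_cutoff paras max_len → Spec_cutoff paras max_len (cutoff paras max_len)

-- ===== LEMMAS AND PROOFS =====

-- reference shape of A's loop, head part: elements taken while the running sum stays ≤ H
def headF (H : Int) : Int → List String → List String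
  | _, [] => []
  | num, p :: r =>
    if num + PySem.Str.len p ≤ H then p :: headF H (num + PySem.Str.len p) r else []

-- reference shape of A's loop, tail part: elements whose running sum exceeds T - H, not in B
def tailF (H T : Int) (B : List String) : Int → List String → List String
  | _, [] => []
  | num, p :: r =>
    if num + PySem.Str.len p ≤ H then tailF H T B (num + PySem.Str.len p) r
    else if num + PySem.Str.len p > T - H then
      if p ∉ B then p :: tailF H T B (num + PySem.Str.len p) r
      else tailF H T B (num + PySem.Str.len p) r
    else tailF H T B (num + PySem.Str.len p) r

lemma len_nonneg (s : String) : 0 ≤ PySem.Str.len s := by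
  simp [PySem.Str.len_eq]

lemma headF_eq_nil {H num : Int} (ps : List String) (h : H < num) : headF H num ps = [] := by
  cases ps with
  | nil => rfl
  | cons p r =>
    have hl := len_nonneg p
    simp only [headF]
    rw [if_neg]
    omega

lemma loop_eq (H T : Int) (ps : List String) : ∀ (i num : Int) (bag bag2 : List String),
    (PySem.List.enumerate ps i).foldl
      (fun (s : Int × List String × List String) it =>
        if s.1 + PySem.Str.len it.2 ≤ H then
          (s.1 + PySem.Str.len it.2, s.2.1 ++ [it.2], s.2.2)
        else if s.1 + PySem.Str.len it.2 > T - H then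
          if it.2 ∉ s.2.1 then (s.1 + PySem.Str.len it.2, s.2.1, s.2.2 ++ [it.2])
          else (s.1 + PySem.Str.len it.2, s.2.1, s.2.2)
        else (s.1 + PySem.Str.len it.2, s.2.1, s.2.2))
      (num, bag, bag2)
    = (num + ((ps.map PySem.Str.len).sum),
       bag ++ headF H num ps,
       bag2 ++ tailF H T (bag ++ headF H num ps) num ps) := by
  induction ps with
  | nil => intro i num bag bag2; simp [PySem.List.enumerate_nil, headF, tailF]
  | cons p r ih =>
    intro i num bag bag2
    rw [PySem.List.enumerate_cons, List.foldl_cons]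
    by_cases h1 : num + PySem.Str.len p ≤ H
    · simp only [if_pos h1]
      rw [ih]
      simp only [headF, tailF, if_pos h1]
      simp [add_assoc]
    · have hH : H < num + PySem.Str.len p := by omega
      have hnil : headF H (num + PySem.Str.len p) r = [] := headF_eq_nil r hH
      simp only [headF, tailF, if_neg h1]
      by_cases h2 : num + PySem.Str.len p > T - H
      · simp only [if_pos h2]
        by_cases h3 : p ∈ bag
        · simp only [if_neg (not_not_intro h3)]
          rw [ih, hnil]
          simp [add_assoc, if_neg (not_not_intro (by simpa using h3))]
        · simp only [if_pos h3]
          rw [ih, hnil]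
          simp only [List.append_nil, if_pos h3]
          simp [add_assoc]
      · simp only [if_neg h2]
        rw [ih, hnil]
        simp [add_assoc]

lemma le_mem_pyAccumulate (ls : List Int) (h : ∀ l ∈ ls, 0 ≤ l) : ∀ a, ∀ x ∈ pyAccumulate a ls, a ≤ x := by
  induction ls with
  | nil => simp [pyAccumulate]
  | cons l rest ih =>
    intro a x hx
    rw [pyAccumulate] at hx
    rcases List.mem_cons.1 hx with rfl | hx
    · have := h l (by simp); omega
    · have := ih (fun y hy => h y (by simp [hy])) (a + l) x hx
      have := h l (by simp); omega

lemma sorted_pyAccumulate (ls : List Int) (h : ∀ l ∈ ls, 0 ≤ l) : ∀ a,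
    (pyAccumulate a ls).Pairwise (· ≤ ·) := by
  induction ls with
  | nil => intro a; simp [pyAccumulate]
  | cons l rest ih =>
    intro a
    rw [pyAccumulate]
    refine List.pairwise_cons.2 ⟨?_, ih (fun y hy => h y (by simp [hy])) (a + l)⟩
    exact le_mem_pyAccumulate rest (fun y hy => h y (by simp [hy])) (a + l)

lemma length_pyAccumulate (ls : List Int) : ∀ a, (pyAccumulate a ls).length = ls.length := by
  induction ls with
  | nil => intro a; rfl
  | cons l rest ih => intro a; simp [pyAccumulate, ih]

lemma getLastD_pyAccumulate (ls : List Int) : ∀ a, (pyAccumulate a ls).getLastD a = a + ls.sum := by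
  induction ls with
  | nil => simp [pyAccumulate]
  | cons l rest ih => intro a; rw [pyAccumulate, List.getLastD_cons, ih]; simp [add_assoc]

lemma chars_len_join (ps : List (List Char)) : (PySem.Chars.join [] ps).length = (ps.map List.length).sum := by
  match ps with
  | [] => simp [PySem.Chars.join_nil]
  | [p] => simp [PySem.Chars.join_singleton]
  | p :: q :: rest =>
    rw [PySem.Chars.join_cons_cons]
    have := chars_len_join (q :: rest)
    simp_all

lemma len_join_nil (ps : List String) : PySem.Str.len (PySem.Str.join "" ps) = (ps.map PySem.Str.len).sum := by
  rw [PySem.Str.len_eq, PySem.Str.toList_join]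
  have h0 : ("" : String).toList = [] := rfl
  rw [h0, chars_len_join]
  induction ps with
  | nil => simp
  | cons p r ih =>
    simp only [List.map_cons, List.sum_cons, PySem.Str.len_eq] at *
    push_cast at *
    omega

lemma headF_take (H : Int) (ps : List String) : ∀ (num : Int) (k : Nat),
    k ≤ ps.length →
    (∀ (j : Nat) (hj : j < (pyAccumulate num (ps.map PySem.Str.len)).length),
        j < k → (pyAccumulate num (ps.map PySem.Str.len))[j] ≤ H) →
    (∀ (j : Nat) (hj : j < (pyAccumulate num (ps.map PySem.Str.len)).length),
        k ≤ j → H < (pyAccumulate num (ps.map PySem.Str.len))[j]) →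
    headF H num ps = ps.take k := by
  induction ps with
  | nil =>
    intro num k hk _ _
    have : k = 0 := Nat.le_zero.1 (by simpa using hk)
    subst this; rfl
  | cons p r ih =>
    intro num k hk hlo hhi
    simp only [List.map_cons, pyAccumulate] at hlo hhi
    match k with
    | 0 =>
      have h0 := hhi 0 (by simp) (Nat.zero_le _)
      simp only [List.getElem_cons_zero] at h0
      simp only [headF, List.take_zero]
      rw [if_neg (show ¬ num + PySem.Str.len p ≤ H by omega)]
    | k' + 1 =>
      have h0 := hlo 0 (by simp) (Nat.succ_pos _)
      simp only [List.getElem_cons_zero] at h0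
      simp only [headF, if_pos h0, List.take_succ_cons]
      congr 1
      exact ih (num + PySem.Str.len p) k' (by simpa using hk)
        (fun j hj hjk => by have := hlo (j+1) (by simpa using hj) (by omega); simpa using this)
        (fun j hj hjk => by have := hhi (j+1) (by simpa using hj) (by omega); simpa using this)

lemma tailF_filter (H T : Int) (B : List String) (ps : List String) : ∀ (num : Int) (t : Nat),
    t ≤ ps.length →
    (∀ (j : Nat) (hj : j < (pyAccumulate num (ps.map PySem.Str.len)).length),
        j < t → (pyAccumulate num (ps.map PySem.Str.len))[j] ≤ H ∨
                (pyAccumulate num (ps.map PySem.Str.len))[j] ≤ T - H) →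
    (∀ (j : Nat) (hj : j < (pyAccumulate num (ps.map PySem.Str.len)).length),
        t ≤ j → H < (pyAccumulate num (ps.map PySem.Str.len))[j] ∧
                T - H < (pyAccumulate num (ps.map PySem.Str.len))[j]) →
    tailF H T B num ps = (ps.drop t).filter (fun p => decide (p ∉ B)) := by
  induction ps with
  | nil =>
    intro num t hk _ _
    have : t = 0 := Nat.le_zero.1 (by simpa using hk)
    subst this; rfl
  | cons p r ih =>
    intro num t hk hlo hhi
    simp only [List.map_cons, pyAccumulate] at hlo hhi
    match t with
    | 0 =>
      have h0 := hhi 0 (by simp) (Nat.zero_le _)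
      simp only [List.getElem_cons_zero] at h0
      have hrec := ih (num + PySem.Str.len p) 0 (Nat.zero_le _)
        (fun j hj hjk => by omega)
        (fun j hj hjk => by have := hhi (j+1) (by simpa using hj) (by omega); simpa using this)
      simp only [tailF]
      rw [if_neg (show ¬ num + PySem.Str.len p ≤ H by omega),
        if_pos (show num + PySem.Str.len p > T - H by omega)]
      simp only [List.drop_zero, List.filter_cons]
      by_cases h3 : p ∈ B
      · simp only [if_neg (not_not_intro h3), hrec, List.drop_zero]
        simp [h3]
      · simp only [if_pos h3, hrec, List.drop_zero]
        simp [h3]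
    | t' + 1 =>
      have h0 := hlo 0 (by simp) (Nat.succ_pos _)
      simp only [List.getElem_cons_zero] at h0
      have hrec := ih (num + PySem.Str.len p) t' (by simpa using hk)
        (fun j hj hjk => by have := hlo (j+1) (by simpa using hj) (by omega); simpa using this)
        (fun j hj hjk => by have := hhi (j+1) (by simpa using hj) (by omega); simpa using this)
      rw [List.drop_succ_cons]
      by_cases h1 : num + PySem.Str.len p ≤ H
      · simp only [tailF, if_pos h1, hrec]
      · rcases h0 with h0 | h0
        · omega
        · simp only [tailF]
          rw [if_neg h1, if_neg (show ¬ num + PySem.Str.len p > T - H by omega)]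
          exact hrec

lemma set_filter_pred (bag : List String) (p : String) :
    (!(PySem.Set.contains (PySem.Set.ofList bag) p)) = decide (p ∉ bag) := by
  by_cases hp : p ∈ bag <;> simp [hp]

-- ===== VERDICT (by name: the statement is the Claim_ definition above) =====
theorem cutoff_spec : Claim_equal_cutoff := by
  intro paras max_len _
  unfold Spec_cutoff
  have hlens : ∀ l ∈ paras.map PySem.Str.len, 0 ≤ l := by
    intro l hl
    obtain ⟨s, _, rfl⟩ := List.mem_map.1 hl
    exact len_nonneg s
  have hsorted := sorted_pyAccumulate (paras.map PySem.Str.len) hlens 0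
  have hpreflen : (pyAccumulate 0 (paras.map PySem.Str.len)).length = paras.length := by
    rw [length_pyAccumulate]; simp
  have htotA : PySem.Str.len (PySem.Str.join "" paras) = (paras.map PySem.Str.len).sum :=
    len_join_nil paras
  have htotB : (pyAccumulate 0 (paras.map PySem.Str.len)).getLastD 0 = (paras.map PySem.Str.len).sum := by
    simpa using getLastD_pyAccumulate (paras.map PySem.Str.len) 0
  simp only [cutoff, cutoff_alt, htotA, htotB]
  by_cases hS : (paras.map PySem.Str.len).sum > max_len
  · rw [if_pos hS, if_neg (by omega : ¬ (paras.map PySem.Str.len).sum ≤ max_len)]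
    rw [loop_eq (PySem.Int.truncdiv max_len 2) ((paras.map PySem.Str.len).sum) paras 0 0 [] []]
    obtain ⟨hle1, hlt1, hgt1⟩ :=
      PySem.List.bisectRight_spec (pyAccumulate 0 (paras.map PySem.Str.len)) (PySem.Int.truncdiv max_len 2) hsorted
    obtain ⟨hle2, hlt2, hgt2⟩ :=
      PySem.List.bisectRight_spec (pyAccumulate 0 (paras.map PySem.Str.len)) ((paras.map PySem.Str.len).sum - PySem.Int.truncdiv max_len 2) hsorted
    have hhead : headF (PySem.Int.truncdiv max_len 2) 0 paras
        = paras.take (PySem.List.bisectRight (pyAccumulate 0 (paras.map PySem.Str.len)) (PySem.Int.truncdiv max_len 2)) :=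
      headF_take _ paras 0 _ (hpreflen ▸ hle1) hlt1 hgt1
    have htail : tailF (PySem.Int.truncdiv max_len 2) ((paras.map PySem.Str.len).sum)
        (paras.take (PySem.List.bisectRight (pyAccumulate 0 (paras.map PySem.Str.len)) (PySem.Int.truncdiv max_len 2))) 0 paras
        = (paras.drop (max
            (PySem.List.bisectRight (pyAccumulate 0 (paras.map PySem.Str.len)) (PySem.Int.truncdiv max_len 2))
            (PySem.List.bisectRight (pyAccumulate 0 (paras.map PySem.Str.len)) ((paras.map PySem.Str.len).sum - PySem.Int.truncdiv max_len 2)))).filter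
            (fun p => decide (p ∉ paras.take (PySem.List.bisectRight (pyAccumulate 0 (paras.map PySem.Str.len)) (PySem.Int.truncdiv max_len 2)))) := by
      apply tailF_filter
      · exact max_le (hpreflen ▸ hle1) (hpreflen ▸ hle2)
      · intro j hj hjt
        rcases lt_max_iff.1 hjt with hjh | hjt0
        · exact Or.inl (hlt1 j hj hjh)
        · exact Or.inr (hlt2 j hj hjt0)
      · intro j hj hjt
        exact ⟨hgt1 j hj (le_trans (Nat.le_max_left _ _) hjt),
               hgt2 j hj (le_trans (Nat.le_max_right _ _) hjt)⟩
    have hfiltereq :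
        ((paras.drop (max
            (PySem.List.bisectRight (pyAccumulate 0 (paras.map PySem.Str.len)) (PySem.Int.truncdiv max_len 2))
            (PySem.List.bisectRight (pyAccumulate 0 (paras.map PySem.Str.len)) ((paras.map PySem.Str.len).sum - PySem.Int.truncdiv max_len 2)))).filter
            (fun p => decide (p ∉ paras.take (PySem.List.bisectRight (pyAccumulate 0 (paras.map PySem.Str.len)) (PySem.Int.truncdiv max_len 2)))))
        = ((paras.drop (max
            (PySem.List.bisectRight (pyAccumulate 0 (paras.map PySem.Str.len)) (PySem.Int.truncdiv max_len 2))
            (PySem.List.bisectRight (pyAccumulate 0 (paras.map PySem.Str.len)) ((paras.map PySem.Str.len).sum - PySem.Int.truncdiv max_len 2)))).filter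
            (fun p => !(PySem.Set.contains (PySem.Set.ofList (paras.take (PySem.List.bisectRight (pyAccumulate 0 (paras.map PySem.Str.len)) (PySem.Int.truncdiv max_len 2)))) p))) := by
      apply List.filter_congr
      intro p _
      rw [set_filter_pred]
    simp only [List.nil_append]
    rw [hhead, htail, ← hfiltereq]
    split_ifs <;> rfl
  · rw [if_neg hS, if_pos (by omega : (paras.map PySem.Str.len).sum ≤ max_len)]
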